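-- pv_equiv track=rewrite | github.com/XinbinYang/macro-trend-web | scripts/build_beta70_nav.py | first_trading_day_of_month
-- ===== SOURCE A (Python) =====
-- from typing import Dict, List, Tuple, Optional
--
-- def first_trading_day_of_month(date_strs: List[str]) -> List[int]:
--     # date_strs in YYYY-MM-DD sorted ascending
--     idx = []
--     last = None
--     for i, ds in enumerate(date_strs):
--         ym = ds[:7]
--         if ym != last:
--             idx.append(i)
--             last = ym
--     return idx
-- ===== SOURCE B (Python) =====
-- from typing import List
--
-- def first_trading_day_of_month(date_strs: List[str]) -> List[int]:
--     # Divide and conquer: compute the month-start indices of each half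
--     # recursively, then glue them, dropping the right half's leading start
--     # when the month continues across the split point.
--     def rec(lo: int, hi: int) -> List[int]:
--         if hi - lo <= 1:
--             return list(range(lo, hi))
--         mid = (lo + hi) // 2
--         left = rec(lo, mid)
--         right = rec(mid, hi)
--         if date_strs[mid - 1][:7] == date_strs[mid][:7]:
--             right = right[1:]
--         return left + right
--     return rec(0, len(date_strs))
-- ===== Notes on version B (the rewrite author's own statement) =====
-- stated objective: alternative
-- what changed: Replaces A's single stateful left-to-right scan with a 'last month' sentinel by a divide-and-conquer recursion: month starts of each half are computed independently and glued, dropping the right half's leading start when the month continues across the split.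
import Mathlib
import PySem

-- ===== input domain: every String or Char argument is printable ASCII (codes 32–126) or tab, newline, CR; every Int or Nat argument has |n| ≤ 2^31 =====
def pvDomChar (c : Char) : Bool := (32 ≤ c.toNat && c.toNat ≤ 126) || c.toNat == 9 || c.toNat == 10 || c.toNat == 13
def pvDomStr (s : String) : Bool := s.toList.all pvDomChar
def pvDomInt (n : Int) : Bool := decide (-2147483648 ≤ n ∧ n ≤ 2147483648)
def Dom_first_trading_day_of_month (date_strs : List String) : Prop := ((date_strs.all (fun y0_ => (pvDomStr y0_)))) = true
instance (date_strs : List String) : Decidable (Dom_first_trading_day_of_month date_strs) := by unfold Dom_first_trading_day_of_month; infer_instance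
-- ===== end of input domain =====

-- B replaces A's stateful left-to-right scan (sentinel 'last') by a divide-and-conquer
-- recursion that glues each half's month starts (alternative decomposition, similar cost).

-- ===== PORT A =====
def first_trading_day_of_month (date_strs : List String) : List Int :=
  ((PySem.List.enumerate date_strs 0).foldl
    (fun (st : List Int × Option String) p =>
      let ym := PySem.Str.slice p.2 none (some 7)
      if some ym ≠ st.2 then (st.1 ++ [p.1], some ym) else st)
    (([] : List Int), (none : Option String))).1

-- ===== PORT B =====
-- rec(lo, hi) of Source B; date_strs[mid-1] / date_strs[mid] are in range in every call
-- reached from the top-level rec(0, len), so the '.getD ""' default is never taken.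
def pvRecB (date_strs : List String) (lo hi : Int) : List Int :=
  if hi - lo ≤ 1 then PySem.List.pyRange lo hi 1
  else
    let mid := PySem.Int.floordiv (lo + hi) 2
    let left := pvRecB date_strs lo mid
    let right := pvRecB date_strs mid hi
    if PySem.Str.slice ((PySem.List.pyGet? date_strs (mid - 1)).getD "") none (some 7)
        = PySem.Str.slice ((PySem.List.pyGet? date_strs mid).getD "") none (some 7)
    then left ++ PySem.List.slice right (some 1) none
    else left ++ right
termination_by (hi - lo).toNat
decreasing_by
  all_goals
    rw [PySem.Int.floordiv_eq_ediv_of_pos (by norm_num : (0:Int) < 2)] at *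
    omega

def first_trading_day_of_month_alt (date_strs : List String) : List Int :=
  pvRecB date_strs 0 (date_strs.length : Int)

-- ===== PRECONDITION & SPEC =====
def Spec_first_trading_day_of_month (date_strs : List String) (out : List Int) : Prop := out = first_trading_day_of_month_alt date_strs
instance (date_strs : List String) (out : List Int) : Decidable (Spec_first_trading_day_of_month date_strs out) := by unfold Spec_first_trading_day_of_month; infer_instance

-- ===== CLAIM (what is proved, stated in full; the proofs are below) =====
def Claim_equal_first_trading_day_of_month : Prop := ∀ (date_strs : List String), Dom_first_trading_day_of_month date_strs → Spec_first_trading_day_of_month date_strs (first_trading_day_of_month date_strs)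

-- ===== LEMMAS AND PROOFS =====

-- month prefix of a date string
def pvM (d : String) : String := PySem.Str.slice d none (some 7)

-- change-detection indices of t starting at index i, k the previous month prefix
def pvF (i : Int) (k : String) : List String → List Int
  | [] => []
  | d :: t => if pvM d = k then pvF (i + 1) k t else i :: pvF (i + 1) (pvM d) t

-- month-start indices of a whole (sub)list, first index i
def pvBnd (i : Int) : List String → List Int
  | [] => []
  | d :: t => i :: pvF (i + 1) (pvM d) t

-- month prefix of the last element (k if empty)
def pvLastM (k : String) : List String → String
  | [] => k
  | d :: t => pvLastM (pvM d) t

theorem pvA_loop (t : List String) : ∀ (acc : List Int) (i : Int) (k : String),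
    ((PySem.List.enumerate t i).foldl
      (fun (st : List Int × Option String) p =>
        let ym := PySem.Str.slice p.2 none (some 7)
        if some ym ≠ st.2 then (st.1 ++ [p.1], some ym) else st)
      (acc, some k)).1 = acc ++ pvF i k t := by
  induction t with
  | nil => intro acc i k; simp [PySem.List.enumerate_nil, pvF]
  | cons d t ih =>
    intro acc i k
    rw [PySem.List.enumerate_cons, List.foldl_cons]
    by_cases h : pvM d = k
    · have step : (let ym := PySem.Str.slice (i, d).2 none (some 7)
          if some ym ≠ ((acc, some k) : List Int × Option String).2 then
            ((acc, some k).1 ++ [(i, d).1], some ym) else (acc, some k)) =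
          ((acc, some k) : List Int × Option String) := by
        simp [pvM] at h; simp [h]
      rw [step, ih]; simp [pvF, h]
    · have step : (let ym := PySem.Str.slice (i, d).2 none (some 7)
          if some ym ≠ ((acc, some k) : List Int × Option String).2 then
            ((acc, some k).1 ++ [(i, d).1], some ym) else (acc, some k)) =
          ((acc ++ [i], some (pvM d)) : List Int × Option String) := by
        simp [pvM] at h ⊢; simp [h]
      rw [step, ih]; simp [pvF, h]

theorem pvA_eq (ds : List String) : first_trading_day_of_month ds = pvBnd 0 ds := by
  cases ds with
  | nil => simp [first_trading_day_of_month, PySem.List.enumerate_nil, pvBnd]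
  | cons d t =>
    unfold first_trading_day_of_month
    rw [PySem.List.enumerate_cons, List.foldl_cons]
    have step0 : (let ym := PySem.Str.slice ((0 : Int), d).2 none (some 7)
        if some ym ≠ (([], none) : List Int × Option String).2 then
          ((([], none) : List Int × Option String).1 ++ [((0 : Int), d).1], some ym)
        else (([], none) : List Int × Option String)) =
        (([0], some (pvM d)) : List Int × Option String) := by simp [pvM]
    rw [step0, pvA_loop]
    simp [pvBnd]

theorem pvF_append (xs : List String) : ∀ (ys : List String) (i : Int) (k : String),
    pvF i k (xs ++ ys) = pvF i k xs ++ pvF (i + xs.length) (pvLastM k xs) ys := by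
  induction xs with
  | nil => intro ys i k; simp [pvF, pvLastM]
  | cons d t ih =>
    intro ys i k
    by_cases h : pvM d = k
    · simp [pvF, pvLastM, h, ih]; ring_nf
    · simp [pvF, pvLastM, h, ih]; ring_nf

theorem pvLastM_getLast (xs : List String) : ∀ (k : String) (h : xs ≠ []),
    pvLastM k xs = pvM (xs.getLast h) := by
  induction xs with
  | nil => intro k h; exact absurd rfl h
  | cons d t ih =>
    intro k h
    cases t with
    | nil => simp [pvLastM]
    | cons e u =>
      rw [List.getLast_cons (by simp)]
      exact ih (pvM d) (by simp)

-- glue: change detection over a nonempty right part, given the previous month k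
theorem pvF_vs_pvBnd (e : String) (u : List String) (j : Int) (k : String) :
    pvF j k (e :: u) = if pvM e = k then (pvBnd j (e :: u)).tail else pvBnd j (e :: u) := by
  by_cases h : pvM e = k
  · simp [pvF, pvBnd, h]
  · simp [pvF, pvBnd, h]

theorem pvBnd_append (d : String) (t ys : List String) (i : Int) :
    pvBnd i ((d :: t) ++ ys) =
      pvBnd i (d :: t) ++ pvF ((i + 1) + t.length) (pvLastM (pvM d) t) ys := by
  simp [pvBnd, pvF_append]

theorem pvRecB_eq (ds : List String) : ∀ (n : Nat) (lo hi : Int),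
    (hi - lo).toNat ≤ n → 0 ≤ lo → lo ≤ hi → hi ≤ (ds.length : Int) →
    pvRecB ds lo hi = pvBnd lo ((ds.drop lo.toNat).take (hi - lo).toNat) := by
  intro n
  induction n with
  | zero =>
    intro lo hi h0 h1 h2 h3
    rw [pvRecB, if_pos (by omega), PySem.List.pyRange_one_eq_nil (by omega)]
    have hz : (hi - lo).toNat = 0 := by omega
    simp [hz, pvBnd]
  | succ n ih =>
    intro lo hi h0 h1 h2 h3
    rw [pvRecB]
    by_cases hsmall : hi - lo ≤ 1
    · rw [if_pos hsmall]
      by_cases heq : hi = lo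
      · rw [PySem.List.pyRange_one_eq_nil (by omega)]
        have hz : (hi - lo).toNat = 0 := by omega
        simp [hz, pvBnd]
      · have hh : hi = lo + 1 := by omega
        subst hh
        rw [PySem.List.pyRange_one_singleton]
        have hlen : lo.toNat < ds.length := by omega
        have hone : (lo + 1 - lo).toNat = 1 := by omega
        have hseg : (ds.drop lo.toNat).take (lo + 1 - lo).toNat = [ds[lo.toNat]] := by
          rw [hone, List.drop_eq_getElem_cons hlen]
          rfl
        rw [hseg]
        simp [pvBnd, pvF]
    · simp only [if_neg hsmall]
      have hmid2 : PySem.Int.floordiv (lo + hi) 2 = (lo + hi) / 2 :=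
        PySem.Int.floordiv_eq_ediv_of_pos (by norm_num)
      set mid := PySem.Int.floordiv (lo + hi) 2 with hmiddef
      have hb1 : lo + 1 ≤ mid := by omega
      have hb2 : mid + 1 ≤ hi := by omega
      rw [ih lo mid (by omega) (by omega) (by omega) (by omega),
          ih mid hi (by omega) (by omega) (by omega) (by omega)]
      -- split the segment at mid
      have hsplit : (ds.drop lo.toNat).take (hi - lo).toNat
          = (ds.drop lo.toNat).take (mid - lo).toNat
            ++ (ds.drop mid.toNat).take (hi - mid).toNat := by
        have h1 : (hi - lo).toNat = (mid - lo).toNat + (hi - mid).toNat := by omega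
        rw [h1, List.take_add, List.drop_drop]
        have h2 : lo.toNat + (mid - lo).toNat = mid.toNat := by omega
        rw [h2]
      have hmidlen : mid.toNat < ds.length := by omega
      -- the right segment starts with ds[mid]
      have hsegR : (ds.drop mid.toNat).take (hi - mid).toNat
          = ds[mid.toNat] :: (ds.drop (mid.toNat + 1)).take ((hi - mid).toNat - 1) := by
        have h3 : (hi - mid).toNat = ((hi - mid).toNat - 1) + 1 := by omega
        rw [List.drop_eq_getElem_cons hmidlen]
        conv_lhs => rw [h3]
        rw [List.take_succ_cons]
      -- the left segment is nonempty; peel its head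
      have hlenL : ((ds.drop lo.toNat).take (mid - lo).toNat).length = (mid - lo).toNat := by
        simp [List.length_take, List.length_drop]; omega
      have hLne : (ds.drop lo.toNat).take (mid - lo).toNat ≠ [] := by
        intro hc; rw [hc] at hlenL; simp at hlenL; omega
      obtain ⟨d, t, hdt⟩ := List.exists_cons_of_ne_nil hLne
      -- last element of the left segment is ds[mid-1]
      have hlastL : pvLastM (pvM d) t = pvM ds[mid.toNat - 1] := by
        have h4 : pvLastM (pvM d) t = pvLastM "" ((ds.drop lo.toNat).take (mid - lo).toNat) := by
          rw [hdt]; rfl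
        have h5 : ((ds.drop lo.toNat).take (mid - lo).toNat)[((ds.drop lo.toNat).take (mid - lo).toNat).length - 1]?
            = ds[mid.toNat - 1]? := by
          rw [hlenL, List.getElem?_take_of_lt (by omega), List.getElem?_drop]
          congr 1
          omega
        rw [h4, pvLastM_getLast _ "" hLne, List.getLast_eq_getElem]
        congr 1
        apply Option.some.inj
        rw [← List.getElem?_eq_getElem, ← List.getElem?_eq_getElem (by omega), h5]
      have htlen : (t.length : Int) = mid - lo - 1 := by
        have := hlenL
        rw [hdt] at this
        simp at this
        omega
      -- the two pyGet? lookups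
      have hg1 : PySem.List.pyGet? ds (mid - 1) = some ds[(mid - 1).toNat] :=
        PySem.List.pyGet?_eq_some_getElem ds (by omega) (by omega)
      have hg0 : PySem.List.pyGet? ds mid = some ds[mid.toNat] :=
        PySem.List.pyGet?_eq_some_getElem ds (by omega) (by omega)
      have hidx : (mid - 1).toNat = mid.toNat - 1 := by omega
      rw [hsplit, hdt, pvBnd_append, hlastL, hg1, hg0]
      simp only [Option.getD_some, hidx]
      have harith : lo + 1 + (t.length : Int) = mid := by omega
      rw [harith, hsegR, pvF_vs_pvBnd]
      by_cases hc : pvM ds[mid.toNat] = pvM ds[mid.toNat - 1]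
      · rw [if_pos hc, if_pos (show PySem.Str.slice ds[mid.toNat - 1] none (some 7)
            = PySem.Str.slice ds[mid.toNat] none (some 7) by simpa [pvM] using hc.symm)]
        rw [PySem.List.slice_from_one]
      · rw [if_neg hc, if_neg (fun hx => hc (show pvM ds[mid.toNat]
            = pvM ds[mid.toNat - 1] by simpa [pvM] using hx.symm))]

-- ===== VERDICT (by name: the statement is the Claim_ definition above) =====
theorem first_trading_day_of_month_spec : Claim_equal_first_trading_day_of_month := by
  intro ds _
  unfold Spec_first_trading_day_of_month first_trading_day_of_month_alt
  rw [pvA_eq, pvRecB_eq ds (ds.length) 0 (ds.length : Int) (by omega) (by omega) (by omega) (by omega)]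
  simp
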